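-- pv_equiv track=rewrite | github.com/yonjaeee/AlgorithmStudy | 프로그래머스/2022_모의고사1/q4.py | solution
-- ===== SOURCE A (Python) =====
-- def solution(beginning, target):
--     changed = [[False] * len(beginning[0]) for x in range(len(beginning))]
--     for i in range(len(beginning)):
--         for j in range(len(beginning[0])):
--             if beginning[i][j] != target[i][j]:
--                 changed[i][j] = True
--     for i in range(len(changed)-1):
--         if (changed[i] == changed[i+1]) or (changed[i] == [not c for c in changed[i+1]]):
--             pass
--         else:
--             return -1
--     changed_t = [[changed[i][j] for i in range(len(changed))] for j in range(len(changed[0]))]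
--     for i in range(len(changed_t)-1):
--         if (changed_t[i] == changed_t[i+1]) or (changed_t[i] == [not c for c in changed_t[i+1]]):
--             pass
--         else:
--             return -1
--     column_changed = changed[0]
--     cc = column_changed.count(True)
--     row_changed = changed_t[0]
--     rc = row_changed.count(True)
--     if column_changed[0] == True:
--         return min(cc + len(row_changed) - rc, len(column_changed) - cc + rc)
--     else:
--         return min(cc + rc, len(column_changed) - cc + len(row_changed) - rc)
-- ===== SOURCE B (Python) =====
-- def solution(beginning, target):
--     r = len(beginning)
--     c = len(beginning[0])
--     g = [beginning[0][j] != target[0][j] for j in range(c)]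
--     f = [(beginning[i][0] != target[i][0]) != g[0] for i in range(r)]
--     for i in range(r):
--         for j in range(c):
--             if (beginning[i][j] != target[i][j]) != (f[i] != g[j]):
--                 return -1
--     cc = sum(g)
--     rc = sum(beginning[i][0] != target[i][0] for i in range(r))
--     if g[0]:
--         return min(cc + r - rc, c - cc + rc)
--     else:
--         return min(cc + rc, c - cc + r - rc)
-- ===== Notes on version B (the rewrite author's own statement) =====
-- stated objective: simpler
-- what changed: B drops A's full boolean matrix, adjacent-row scan, explicit transpose and adjacent-column scan, and instead derives a column flip vector g from the first row and a row flip vector f from the first column, verifies every cell satisfies diff(i,j) = f[i] XOR g[j] (equivalent to A's two adjacency checks, the transpose one being redundant), and applies the same min-cost formula.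
import Mathlib
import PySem

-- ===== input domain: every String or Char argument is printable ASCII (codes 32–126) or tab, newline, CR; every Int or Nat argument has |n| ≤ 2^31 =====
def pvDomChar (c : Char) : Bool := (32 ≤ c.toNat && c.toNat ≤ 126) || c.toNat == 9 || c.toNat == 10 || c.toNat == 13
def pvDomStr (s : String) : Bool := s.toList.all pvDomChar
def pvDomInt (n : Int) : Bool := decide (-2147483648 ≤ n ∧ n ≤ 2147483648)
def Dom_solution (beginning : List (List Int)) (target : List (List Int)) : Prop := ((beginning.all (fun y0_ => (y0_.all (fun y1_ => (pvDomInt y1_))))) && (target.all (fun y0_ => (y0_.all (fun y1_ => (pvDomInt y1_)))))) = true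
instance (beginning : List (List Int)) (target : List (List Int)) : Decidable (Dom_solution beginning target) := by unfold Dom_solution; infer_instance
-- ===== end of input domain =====

-- B replaces A's matrix + adjacency scans + transpose by first-row/first-column flip
-- vectors and one verification pass (objective: simpler).  Indexing is ported with
-- getD: exact for the non-negative in-range indices that range() produces under Pre_.

-- ===== PORT A =====
-- [not c for c in row]
def pvNotRow (xs : List Bool) : List Bool := xs.map (fun c => !c)

-- the 'for i in range(len(m)-1): … else return -1' adjacency scan of A,
-- as a structural recursion over adjacent pairs (short-circuiting like the early return)
def pvAdjOK : List (List Bool) → Bool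
  | [] => true
  | [_] => true
  | a :: b :: rest => ((a == b) || (a == pvNotRow b)) && pvAdjOK (b :: rest)

-- changed[i][j] = (beginning[i][j] != target[i][j]) built over range(r) × range(c)
def pvChanged (beginning target : List (List Int)) : List (List Bool) :=
  (List.range beginning.length).map (fun i =>
    (List.range (beginning.headD []).length).map (fun j =>
      decide (((beginning.getD i []).getD j 0) ≠ ((target.getD i []).getD j 0))))

-- changed_t = [[changed[i][j] for i in range(len(changed))] for j in range(len(changed[0]))]
def pvTransposeA (m : List (List Bool)) : List (List Bool) :=
  (List.range (m.headD []).length).map (fun j =>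
    (List.range m.length).map (fun i => ((m.getD i []).getD j false)))

def solution (beginning : List (List Int)) (target : List (List Int)) : Int :=
  let changed := pvChanged beginning target
  if pvAdjOK changed then
    let changedT := pvTransposeA changed
    if pvAdjOK changedT then
      let columnChanged := changed.headD []
      let cc : Int := (columnChanged.count true : Nat)
      let rowChanged := changedT.headD []
      let rc : Int := (rowChanged.count true : Nat)
      if columnChanged.headD false = true then
        min (cc + (rowChanged.length : Int) - rc) ((columnChanged.length : Int) - cc + rc)
      else
        min (cc + rc) ((columnChanged.length : Int) - cc + (rowChanged.length : Int) - rc)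
    else -1
  else -1

-- ===== PORT B =====
-- beginning[i][j] != target[i][j]
def pvDiff (beginning target : List (List Int)) (i j : Nat) : Bool :=
  decide (((beginning.getD i []).getD j 0) ≠ ((target.getD i []).getD j 0))

def solution_alt (beginning : List (List Int)) (target : List (List Int)) : Int :=
  let r := beginning.length
  let c := (beginning.headD []).length
  let g := (List.range c).map (fun j => pvDiff beginning target 0 j)
  let f := (List.range r).map (fun i => xor (pvDiff beginning target i 0) (g.headD false))
  if (List.range r).all (fun i => (List.range c).all (fun j =>
        pvDiff beginning target i j == xor (f.getD i false) (g.getD j false))) then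
    let cc : Int := (g.count true : Nat)
    let rc : Int := (((List.range r).map (fun i => pvDiff beginning target i 0)).count true : Nat)
    if g.headD false = true then
      min (cc + (r : Int) - rc) ((c : Int) - cc + rc)
    else
      min (cc + rc) ((c : Int) - cc + (r : Int) - rc)
  else -1

-- ===== PRECONDITION & SPEC =====
-- Pre_ excludes exactly the inputs on which A raises IndexError: an empty matrix or
-- empty first row (beginning[0] / changed_t[0] / column_changed[0]), a row of
-- beginning shorter than the first row, or target lacking a cell (i,j) that A reads.
def Pre_solution (beginning : List (List Int)) (target : List (List Int)) : Prop :=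
  beginning ≠ [] ∧ 0 < (beginning.headD []).length ∧
  beginning.length ≤ target.length ∧
  (∀ row ∈ beginning, (beginning.headD []).length ≤ row.length) ∧
  (∀ row ∈ target.take beginning.length, (beginning.headD []).length ≤ row.length)
instance (beginning : List (List Int)) (target : List (List Int)) : Decidable (Pre_solution beginning target) := by unfold Pre_solution; infer_instance

def pvWitness_solution : List (List Int) × List (List Int) := ([[1, 2], [3, 4]], [[1, 5], [3, 4]])

def Spec_solution (beginning : List (List Int)) (target : List (List Int)) (out : Int) : Prop := out = solution_alt beginning target
instance (beginning : List (List Int)) (target : List (List Int)) (out : Int) : Decidable (Spec_solution beginning target out) := by unfold Spec_solution; infer_instance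

-- ===== CLAIM (what is proved, stated in full; the proofs are below) =====
def Claim_equal_solution : Prop := ∀ (beginning : List (List Int)) (target : List (List Int)), Dom_solution beginning target → Pre_solution beginning target → Spec_solution beginning target (solution beginning target)

-- ===== LEMMAS AND PROOFS =====

theorem getD_map_range {α : Type} (h : Nat → α) {n i : Nat} (hi : i < n) (dft : α) :
    ((List.range n).map h).getD i dft = h i := by
  simp [List.getD, hi]

theorem headD_eq_getD {α : Type} (l : List α) (dft : α) : l.headD dft = l.getD 0 dft := by
  cases l <;> simp [List.getD]

-- characterisation of A's adjacency scan
theorem adjOK_iff : ∀ (L : List (List Bool)),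
    pvAdjOK L = true ↔
      ∀ i, i + 1 < L.length →
        (L.getD i [] = L.getD (i+1) [] ∨ L.getD i [] = pvNotRow (L.getD (i+1) []))
  | [] => by simp [pvAdjOK]
  | [a] => by simp [pvAdjOK]
  | a :: b :: rest => by
    rw [pvAdjOK, Bool.and_eq_true, adjOK_iff (b :: rest)]
    constructor
    · rintro ⟨h1, h2⟩ i hi
      cases i with
      | zero =>
        rcases (Bool.or_eq_true _ _).mp h1 with h | h
        · exact Or.inl (by simpa using eq_of_beq h)
        · exact Or.inr (by simpa using eq_of_beq h)
      | succ k =>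
        have hk : k + 1 < (b :: rest).length := by
          simpa using Nat.lt_of_succ_lt_succ (by simpa using hi)
        simpa [List.getD_cons_succ] using h2 k hk
    · intro h
      refine ⟨?_, fun k hk => ?_⟩
      · rcases h 0 (by simp) with h0 | h0
        · exact (Bool.or_eq_true _ _).mpr (Or.inl (beq_iff_eq.mpr (by simpa using h0)))
        · exact (Bool.or_eq_true _ _).mpr (Or.inr (beq_iff_eq.mpr (by simpa using h0)))
      · have := h (k+1) (by simpa using Nat.succ_lt_succ hk)
        simpa [List.getD_cons_succ] using this

theorem changed_getD (b t : List (List Int)) {i : Nat} (hi : i < b.length) :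
    (pvChanged b t).getD i [] =
      (List.range (b.headD []).length).map (fun j => pvDiff b t i j) := by
  unfold pvChanged
  exact getD_map_range _ hi _

theorem changed_length (b t : List (List Int)) : (pvChanged b t).length = b.length := by
  simp [pvChanged]

theorem bool_fact1 (a c2 x : Bool) : (!(xor (xor a c2) x)) = xor (xor (!a) c2) x := by
  cases a <;> cases c2 <;> cases x <;> rfl

theorem bool_fact2 (a x : Bool) : xor (!a) x = !(xor a x) := by
  cases a <;> cases x <;> rfl

theorem bool_neq {a c2 : Bool} (h : a ≠ c2) : a = !c2 := by
  cases a <;> cases c2 <;> simp_all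

-- forward: A's row-adjacency scan succeeding forces the uniform flip formula
theorem chain_formula (b t : List (List Int)) (hc : 0 < (b.headD []).length)
    (hadj : pvAdjOK (pvChanged b t) = true) :
    ∀ i, i < b.length → ∀ j, j < (b.headD []).length →
      pvDiff b t i j = xor (xor (pvDiff b t i 0) (pvDiff b t 0 0)) (pvDiff b t 0 j) := by
  intro i
  induction i with
  | zero =>
    intro _ j hj
    simp
  | succ k ih =>
    intro hk1 j hj
    have hk : k < b.length := Nat.lt_of_succ_lt hk1
    have hadj' := (adjOK_iff (pvChanged b t)).mp hadj k (by rw [changed_length]; omega)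
    rw [changed_getD b t hk, changed_getD b t hk1] at hadj'
    rcases hadj' with he | he
    · have hptw : ∀ j', j' < (b.headD []).length →
          pvDiff b t k j' = pvDiff b t (k+1) j' := by
        intro j' hj'
        have := List.map_eq_map_iff.mp he j' (List.mem_range.mpr hj')
        simpa using this
      rw [← hptw j hj, ← hptw 0 hc]
      exact ih hk j hj
    · unfold pvNotRow at he
      rw [List.map_map] at he
      have hptw : ∀ j', j' < (b.headD []).length →
          pvDiff b t k j' = !(pvDiff b t (k+1) j') := by
        intro j' hj'
        have := List.map_eq_map_iff.mp he j' (List.mem_range.mpr hj')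
        simpa using this
      have ej : pvDiff b t (k+1) j = !(pvDiff b t k j) := by
        rw [hptw j hj]; simp
      have e0 : pvDiff b t (k+1) 0 = !(pvDiff b t k 0) := by
        rw [hptw 0 hc]; simp
      rw [ej, e0, ih hk j hj]
      exact bool_fact1 _ _ _

-- converse: the uniform formula makes A's row-adjacency scan succeed
theorem adj_of_formula (b t : List (List Int))
    (hU : ∀ i, i < b.length → ∀ j, j < (b.headD []).length →
      pvDiff b t i j = xor (xor (pvDiff b t i 0) (pvDiff b t 0 0)) (pvDiff b t 0 j)) :
    pvAdjOK (pvChanged b t) = true := by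
  rw [adjOK_iff]
  intro i hi
  rw [changed_length] at hi
  have hi0 : i < b.length := by omega
  rw [changed_getD b t hi0, changed_getD b t hi]
  by_cases hphi : xor (pvDiff b t i 0) (pvDiff b t 0 0) = xor (pvDiff b t (i+1) 0) (pvDiff b t 0 0)
  · left
    apply List.map_eq_map_iff.mpr
    intro j hj
    rw [List.mem_range] at hj
    rw [hU i hi0 j hj, hU (i+1) hi j hj, hphi]
  · right
    unfold pvNotRow
    rw [List.map_map]
    apply List.map_eq_map_iff.mpr
    intro j hj
    rw [List.mem_range] at hj
    have h2 : xor (pvDiff b t i 0) (pvDiff b t 0 0)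
        = !(xor (pvDiff b t (i+1) 0) (pvDiff b t 0 0)) := bool_neq hphi
    simp only [Function.comp]
    rw [hU i hi0 j hj, hU (i+1) hi j hj, h2, bool_fact2]

-- the transpose A builds, in closed form
theorem transpose_rows (b t : List (List Int)) (hr : 0 < b.length) :
    pvTransposeA (pvChanged b t) =
      (List.range (b.headD []).length).map (fun j =>
        (List.range b.length).map (fun i => pvDiff b t i j)) := by
  unfold pvTransposeA
  rw [headD_eq_getD, changed_getD b t hr, changed_length]
  simp only [List.length_map, List.length_range]
  apply List.map_congr_left
  intro j hj
  rw [List.mem_range] at hj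
  apply List.map_congr_left
  intro i hi
  rw [List.mem_range] at hi
  rw [changed_getD b t hi]
  exact getD_map_range _ hj _

-- the uniform formula also makes A's column-adjacency scan succeed (the transpose check is redundant)
theorem adjT_of_formula (b t : List (List Int)) (hr : 0 < b.length)
    (hU : ∀ i, i < b.length → ∀ j, j < (b.headD []).length →
      pvDiff b t i j = xor (xor (pvDiff b t i 0) (pvDiff b t 0 0)) (pvDiff b t 0 j)) :
    pvAdjOK (pvTransposeA (pvChanged b t)) = true := by
  rw [transpose_rows b t hr, adjOK_iff]
  intro j hj
  simp only [List.length_map, List.length_range] at hj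
  have hj0 : j < (b.headD []).length := by omega
  rw [getD_map_range _ hj0, getD_map_range _ hj]
  by_cases hg : pvDiff b t 0 j = pvDiff b t 0 (j+1)
  · left
    apply List.map_eq_map_iff.mpr
    intro i hi
    rw [List.mem_range] at hi
    rw [hU i hi j hj0, hU i hi (j+1) hj, hg]
  · right
    unfold pvNotRow
    rw [List.map_map]
    apply List.map_eq_map_iff.mpr
    intro i hi
    rw [List.mem_range] at hi
    have h2 : pvDiff b t 0 j = !(pvDiff b t 0 (j+1)) := bool_neq hg
    simp only [Function.comp]
    rw [hU i hi j hj0, hU i hi (j+1) hj, h2]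
    cases xor (pvDiff b t i 0) (pvDiff b t 0 0) <;> cases pvDiff b t 0 (j+1) <;> rfl

-- B's verification pass, characterised
theorem allB_iff (b t : List (List Int)) (hc : 0 < (b.headD []).length) :
    ((List.range b.length).all (fun i => (List.range (b.headD []).length).all (fun j =>
        pvDiff b t i j ==
          xor (((List.range b.length).map (fun i => xor (pvDiff b t i 0)
                  (((List.range (b.headD []).length).map (fun j => pvDiff b t 0 j)).headD false))).getD i false)
              (((List.range (b.headD []).length).map (fun j => pvDiff b t 0 j)).getD j false))) = true)
    ↔ ∀ i, i < b.length → ∀ j, j < (b.headD []).length →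
        pvDiff b t i j = xor (xor (pvDiff b t i 0) (pvDiff b t 0 0)) (pvDiff b t 0 j) := by
  have hghead : ((List.range (b.headD []).length).map (fun j => pvDiff b t 0 j)).headD false
      = pvDiff b t 0 0 := by
    rw [headD_eq_getD]
    exact getD_map_range _ hc _
  constructor
  · intro H i hi j hj
    have := List.all_eq_true.mp H i (List.mem_range.mpr hi)
    have h2 := List.all_eq_true.mp this j (List.mem_range.mpr hj)
    rw [getD_map_range _ hi, getD_map_range _ hj, hghead] at h2
    exact beq_iff_eq.mp h2
  · intro H
    apply List.all_eq_true.mpr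
    intro i hi
    rw [List.mem_range] at hi
    apply List.all_eq_true.mpr
    intro j hj
    rw [List.mem_range] at hj
    rw [getD_map_range _ hi, getD_map_range _ hj, hghead]
    exact beq_iff_eq.mpr (H i hi j hj)

-- ===== VERDICT (by name: the statement is the Claim_ definition above) =====
theorem solution_spec : Claim_equal_solution := by
  intro b t hdom hpre
  obtain ⟨hne, hc, hlen, hrows, htrows⟩ := hpre
  have hr : 0 < b.length := List.length_pos_of_ne_nil hne
  unfold Spec_solution solution solution_alt
  dsimp only
  by_cases hU : ∀ i, i < b.length → ∀ j, j < (b.headD []).length →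
      pvDiff b t i j = xor (xor (pvDiff b t i 0) (pvDiff b t 0 0)) (pvDiff b t 0 j)
  · have hB := (allB_iff b t hc).mpr hU
    have hA := adj_of_formula b t hU
    have hAT := adjT_of_formula b t hr hU
    have hhead : (pvChanged b t).headD [] =
        (List.range (b.headD []).length).map (fun j => pvDiff b t 0 j) := by
      rw [headD_eq_getD]; exact changed_getD b t hr
    have hThead : (pvTransposeA (pvChanged b t)).headD [] =
        (List.range b.length).map (fun i => pvDiff b t i 0) := by
      rw [transpose_rows b t hr, headD_eq_getD]
      exact getD_map_range _ hc _
    rw [hA, hB, hAT]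
    simp only [hhead, hThead]
    simp
  · have hB : ((List.range b.length).all (fun i => (List.range (b.headD []).length).all (fun j =>
        pvDiff b t i j ==
          xor (((List.range b.length).map (fun i => xor (pvDiff b t i 0)
                  (((List.range (b.headD []).length).map (fun j => pvDiff b t 0 j)).headD false))).getD i false)
              (((List.range (b.headD []).length).map (fun j => pvDiff b t 0 j)).getD j false))) = false) :=
      Bool.eq_false_iff.mpr (fun h => hU ((allB_iff b t hc).mp h))
    have hAf : pvAdjOK (pvChanged b t) = false := by
      apply Bool.eq_false_iff.mpr
      intro hA
      exact hU (chain_formula b t hc hA)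
    rw [hAf, hB]
    simp
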